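-- pv_equiv track=rewrite | github.com/PolihronisVarvaris/smart-resume-analyzer | backend/venv/services/ai_analyzer.py | _assess_formatting
-- ===== SOURCE A (Python) =====
-- from typing import Dict, List, Any
--
-- def _assess_formatting(sections: Dict[str, str]) -> int:
--     """Assess resume formatting"""
--     score = 100
--
--     # Check for essential sections
--     essential_sections = ['experience', 'education', 'skills']
--     for section in essential_sections:
--         if not sections.get(section):
--             score -= 20
--
--     # Check section content length
--     for section, content in sections.items():
--         word_count = len(content.split())
--         if section == "experience" and word_count < 10:
--             score -= 10
--         if section == "skills" and word_count < 5:
--             score -= 5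
--
--     return max(0, score)
-- ===== SOURCE B (Python) =====
-- def _assess_formatting(sections):
--     """Assess resume formatting"""
--     essential = {'experience', 'education', 'skills'}
--     present = set()
--     penalty = 0
--     for section, content in sections.items():
--         words = len(content.split())
--         if section in essential and content:
--             present.add(section)
--         if section == 'experience' and words < 10:
--             penalty += 10
--         if section == 'skills' and words < 5:
--             penalty += 5
--     return max(0, 100 - 20 * (len(essential) - len(present)) - penalty)
-- ===== Notes on version B (the rewrite author's own statement) =====
-- stated objective: alternative
-- what changed: Replaces A's two staged passes (a loop over the three essential keys with get(), then a loop over all items()) by a single pass over the items that accumulates a set of present truthy essential sections and an additive penalty, finishing with 100 - 20*(3 - len(present)) - penalty.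
import Mathlib
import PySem

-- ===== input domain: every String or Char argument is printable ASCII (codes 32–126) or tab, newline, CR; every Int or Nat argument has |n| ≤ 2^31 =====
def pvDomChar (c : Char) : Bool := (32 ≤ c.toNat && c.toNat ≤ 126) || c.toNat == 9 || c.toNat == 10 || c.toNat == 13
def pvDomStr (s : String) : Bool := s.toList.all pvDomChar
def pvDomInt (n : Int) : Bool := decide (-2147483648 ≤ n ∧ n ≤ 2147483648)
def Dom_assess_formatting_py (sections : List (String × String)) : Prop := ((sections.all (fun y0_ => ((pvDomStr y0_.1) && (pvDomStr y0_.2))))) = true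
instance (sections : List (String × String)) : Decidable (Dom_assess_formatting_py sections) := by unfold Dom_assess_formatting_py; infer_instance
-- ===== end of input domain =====

-- B replaces A's two staged passes (essential-sections loop, then items() loop) with ONE pass that
-- tracks a present-set of truthy essential sections plus an additive penalty; objective: alternative.

-- sections.get(k) on the dict, modelled as first-match lookup in the association list
def pvGetSec (sections : List (String × String)) (k : String) : Option String :=
  (sections.find? (fun p => p.1 == k)).map (·.2)

-- ===== PORT A =====
def assess_formatting_py (sections : List (String × String)) : Int :=
  let score : Int :=
    ["experience", "education", "skills"].foldl (fun s sec =>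
      match pvGetSec sections sec with
      | none => s - 20
      | some v => if v = "" then s - 20 else s) 100
  let score : Int :=
    sections.foldl (fun s kv =>
      let wc : Int := (PySem.Str.split₀ kv.2).length
      let s := if kv.1 = "experience" ∧ wc < 10 then s - 10 else s
      if kv.1 = "skills" ∧ wc < 5 then s - 5 else s) score
  max 0 score

-- ===== PORT B =====
-- essential = {'experience', 'education', 'skills'}
def pvEssential : PySem.Set String := PySem.Set.ofList ["experience", "education", "skills"]

-- the body of B's single for-loop over sections.items(), state = (present, penalty)
def bStep (st : PySem.Set String × Int) (kv : String × String) : PySem.Set String × Int :=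
  let words : Int := ((PySem.Str.split₀ kv.2).length : Int)
  let present := if PySem.Set.contains pvEssential kv.1 ∧ kv.2 ≠ "" then PySem.Set.add st.1 kv.1 else st.1
  let penalty := st.2 + (if kv.1 = "experience" ∧ words < 10 then 10 else 0)
      + (if kv.1 = "skills" ∧ words < 5 then 5 else 0)
  (present, penalty)

def assess_formatting_py_alt (sections : List (String × String)) : Int :=
  let st := sections.foldl bStep (PySem.Set.empty, 0)
  max 0 (100 - 20 * ((PySem.Set.len pvEssential : Int) - (PySem.Set.len st.1 : Int)) - st.2)

-- ===== PRECONDITION & SPEC =====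
-- Pre_ excludes association lists with duplicate keys: the parameter is a Python dict, which cannot
-- contain duplicate keys, so this excludes no input the Python function is ever called on.
def Pre_assess_formatting_py (sections : List (String × String)) : Prop :=
  (sections.map Prod.fst).Nodup
instance (sections : List (String × String)) : Decidable (Pre_assess_formatting_py sections) := by unfold Pre_assess_formatting_py; infer_instance

def pvWitness_assess_formatting_py : (List (String × String)) :=
  [("experience", "a b c"), ("skills", "python sql"), ("education", "")]

def Spec_assess_formatting_py (sections : List (String × String)) (out : Int) : Prop := out = assess_formatting_py_alt sections
instance (sections : List (String × String)) (out : Int) : Decidable (Spec_assess_formatting_py sections out) := by unfold Spec_assess_formatting_py; infer_instance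

-- ===== CLAIM (what is proved, stated in full; the proofs are below) =====
def Claim_equal_assess_formatting_py : Prop := ∀ (sections : List (String × String)), Dom_assess_formatting_py sections → Pre_assess_formatting_py sections → Spec_assess_formatting_py sections (assess_formatting_py sections)

-- ===== LEMMAS AND PROOFS =====

-- presence indicator of key k (1 iff present with nonempty value), read off via lookup
def pvInd (sections : List (String × String)) (k : String) : Int :=
  match pvGetSec sections k with
  | some v => if v = "" then 0 else 1
  | none => 0

-- penalty contributed by the "experience" / "skills" entries, read off via lookup
def penExp (sections : List (String × String)) : Int :=
  match pvGetSec sections "experience" with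
  | some v => if ((PySem.Str.split₀ v).length : Int) < 10 then 10 else 0
  | none => 0

def penSk (sections : List (String × String)) : Int :=
  match pvGetSec sections "skills" with
  | some v => if ((PySem.Str.split₀ v).length : Int) < 5 then 5 else 0
  | none => 0

lemma pvGetSec_not_mem {sections : List (String × String)} {k : String}
    (h : k ∉ sections.map Prod.fst) : pvGetSec sections k = none := by
  unfold pvGetSec
  rw [List.find?_eq_none.mpr]
  · rfl
  · intro p hp hbeq
    exact h (List.mem_map.mpr ⟨p, hp, by simpa using hbeq⟩)

-- A's items() loop computes the two lookup-based penalties (keys nodup)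
lemma items_fold_eq (sections : List (String × String))
    (h : (sections.map Prod.fst).Nodup) (init : Int) :
    sections.foldl (fun s kv =>
      let wc : Int := (PySem.Str.split₀ kv.2).length
      let s := if kv.1 = "experience" ∧ wc < 10 then s - 10 else s
      if kv.1 = "skills" ∧ wc < 5 then s - 5 else s) init
      = init - penExp sections - penSk sections := by
  induction sections generalizing init with
  | nil => simp [penExp, penSk, pvGetSec]
  | cons kv rest ih =>
    obtain ⟨k, v⟩ := kv
    simp only [List.map_cons, List.nodup_cons] at h
    obtain ⟨hk, hrest⟩ := h
    simp only [List.foldl_cons]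
    rw [ih hrest]
    simp only [penExp, penSk, pvGetSec, List.find?_cons]
    by_cases he : k = "experience"
    · subst he
      have : pvGetSec rest "experience" = none := pvGetSec_not_mem hk
      simp only [pvGetSec] at this
      simp [this]
      split_ifs <;> simp_all
    · by_cases hs : k = "skills"
      · subst hs
        have : pvGetSec rest "skills" = none := pvGetSec_not_mem hk
        simp only [pvGetSec] at this
        simp [this, he]
        split_ifs <;> simp_all <;> omega
      · have h1 : (k == "experience") = false := by simp [he]
        have h2 : (k == "skills") = false := by simp [hs]
        simp [h1, h2, he, hs]

-- pvGetSec / pvInd / penalties on a cons cell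
lemma pvInd_cons (k v : String) (rest : List (String × String)) (key : String) :
    pvInd ((k, v) :: rest) key
      = if k = key then (if v = "" then 0 else 1) else pvInd rest key := by
  by_cases he : k = key <;> simp [pvInd, pvGetSec, List.find?_cons, he]

lemma penExp_cons (k v : String) (rest : List (String × String))
    (hk : k ∉ rest.map Prod.fst) :
    penExp ((k, v) :: rest)
      = (if k = "experience" ∧ ((PySem.Str.split₀ v).length : Int) < 10 then 10 else 0)
        + penExp rest := by
  by_cases he : k = "experience"
  · subst he
    have h0 : pvGetSec rest "experience" = none := pvGetSec_not_mem hk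
    simp only [pvGetSec] at h0
    simp [penExp, pvGetSec, h0]
  · simp [penExp, pvGetSec, List.find?_cons, he]

lemma penSk_cons (k v : String) (rest : List (String × String))
    (hk : k ∉ rest.map Prod.fst) :
    penSk ((k, v) :: rest)
      = (if k = "skills" ∧ ((PySem.Str.split₀ v).length : Int) < 5 then 5 else 0)
        + penSk rest := by
  by_cases he : k = "skills"
  · subst he
    have h0 : pvGetSec rest "skills" = none := pvGetSec_not_mem hk
    simp only [pvGetSec] at h0
    simp [penSk, pvGetSec, h0]
  · simp [penSk, pvGetSec, List.find?_cons, he]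

-- B's single pass: present-set length counts truthy essentials, penalty is the two lookup penalties
lemma bFold_eq (l : List (String × String)) (h : (l.map Prod.fst).Nodup)
    (p : PySem.Set String) (hp : ∀ kv ∈ l, kv.1 ∉ p) (pen : Int) :
    ((l.foldl bStep (p, pen)).1.length : Int)
      = p.length + pvInd l "experience" + pvInd l "education" + pvInd l "skills" ∧
    (l.foldl bStep (p, pen)).2 = pen + penExp l + penSk l := by
  induction l generalizing p pen with
  | nil => simp [pvInd, penExp, penSk, pvGetSec]
  | cons kv rest ih =>
    obtain ⟨k, v⟩ := kv
    simp only [List.map_cons, List.nodup_cons] at h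
    obtain ⟨hk, hrest⟩ := h
    have hkp : k ∉ p := hp (k, v) (List.mem_cons_self)
    have hp' : ∀ x ∈ rest, x.1 ∉ (if PySem.Set.contains pvEssential k ∧ v ≠ "" then PySem.Set.add p k else p) := by
      intro x hx
      have hxp : x.1 ∉ p := hp x (List.mem_cons_of_mem _ hx)
      have hxk : x.1 ≠ k := by
        intro he; exact hk (List.mem_map.mpr ⟨x, hx, he⟩)
      split
      · simp [PySem.Set.mem_add, hxp, hxk]
      · exact hxp
    have hadd : (PySem.Set.add p k).length = p.length + 1 := by
      simp [PySem.Set.add, hkp]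
    simp only [List.foldl_cons, bStep]
    obtain ⟨ih1, ih2⟩ := ih hrest _ hp' (pen + (if k = "experience" ∧ ((PySem.Str.split₀ v).length : Int) < 10 then 10 else 0) + (if k = "skills" ∧ ((PySem.Str.split₀ v).length : Int) < 5 then 5 else 0))
    refine ⟨?_, ?_⟩
    · rw [ih1]
      simp only [pvInd_cons]
      by_cases he : k = "experience"
      · subst he
        have h0 : pvInd rest "experience" = 0 := by
          unfold pvInd; rw [pvGetSec_not_mem hk]
        by_cases hv : v = "" <;>
          simp [pvEssential, PySem.Set.contains, PySem.Set.ofList, hv, hadd, h0] <;> push_cast <;> ring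
      · by_cases hd : k = "education"
        · subst hd
          have h0 : pvInd rest "education" = 0 := by
            unfold pvInd; rw [pvGetSec_not_mem hk]
          by_cases hv : v = "" <;>
            simp [pvEssential, PySem.Set.contains, PySem.Set.ofList, hv, hadd, h0] <;> push_cast <;> ring
        · by_cases hs : k = "skills"
          · subst hs
            have h0 : pvInd rest "skills" = 0 := by
              unfold pvInd; rw [pvGetSec_not_mem hk]
            by_cases hv : v = "" <;>
              simp [pvEssential, PySem.Set.contains, PySem.Set.ofList, hv, hadd, h0] <;> push_cast <;> ring
          · have hcm : k ∉ pvEssential := by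
              simp [pvEssential, PySem.Set.ofList, he, hd, hs]
            have hc : PySem.Set.contains pvEssential k = false := by
              simp [pvEssential, PySem.Set.contains, PySem.Set.ofList, he, hd, hs]
            simp [hcm, hc, he, hd, hs]
    · rw [ih2, penExp_cons k v rest hk, penSk_cons k v rest hk]
      ring

-- ===== VERDICT (by name: the statement is the Claim_ definition above) =====
theorem assess_formatting_py_spec : Claim_equal_assess_formatting_py := by
  intro sections _ hpre
  unfold Spec_assess_formatting_py assess_formatting_py assess_formatting_py_alt
  obtain ⟨h1, h2⟩ := bFold_eq sections hpre PySem.Set.empty (by simp [PySem.Set.empty]) 0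
  simp only [items_fold_eq sections hpre]
  simp only [List.foldl_cons, List.foldl_nil]
  have hlen : (PySem.Set.len ((sections.foldl bStep (PySem.Set.empty, 0)).1) : Int)
      = pvInd sections "experience" + pvInd sections "education" + pvInd sections "skills" := by
    simp only [PySem.Set.len]
    rw [h1]; simp [PySem.Set.empty]
  rw [hlen, h2]
  simp only [pvInd, penExp, penSk]
  rcases hE : pvGetSec sections "experience" with _ | vE <;>
  rcases hD : pvGetSec sections "education" with _ | vD <;>
  rcases hS : pvGetSec sections "skills" with _ | vS <;>
    simp [hE, hD, hS, PySem.Set.len, pvEssential, PySem.Set.ofList] <;> split_ifs <;> simp_all <;> omega
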